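-- pv_equiv track=rewrite | github.com/anilk23m/Working_Folder | python_projects/Python_Coding_Round/separate_upper_lower_case_characters.py | separate_upper_lower
-- ===== SOURCE A (Python) =====
-- def separate_upper_lower(s):
--     uppercase = []
--     lowercase = []
--
--     for i in s:
--         if i.isupper():
--             uppercase.append(i)
--         elif i.islower():
--             lowercase.append(i)
--     return "".join(uppercase), "".join(lowercase)
-- ===== SOURCE B (Python) =====
-- def separate_upper_lower(s):
--     return ("".join(c for c in s if c.isupper()),
--             "".join(c for c in s if c.islower()))
-- ===== Notes on version B (the rewrite author's own statement) =====
-- stated objective: idiomatic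
-- what changed: Replaces the single loop maintaining two accumulator lists with two independent filtering passes (comprehensions), one per case.
import Mathlib
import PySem

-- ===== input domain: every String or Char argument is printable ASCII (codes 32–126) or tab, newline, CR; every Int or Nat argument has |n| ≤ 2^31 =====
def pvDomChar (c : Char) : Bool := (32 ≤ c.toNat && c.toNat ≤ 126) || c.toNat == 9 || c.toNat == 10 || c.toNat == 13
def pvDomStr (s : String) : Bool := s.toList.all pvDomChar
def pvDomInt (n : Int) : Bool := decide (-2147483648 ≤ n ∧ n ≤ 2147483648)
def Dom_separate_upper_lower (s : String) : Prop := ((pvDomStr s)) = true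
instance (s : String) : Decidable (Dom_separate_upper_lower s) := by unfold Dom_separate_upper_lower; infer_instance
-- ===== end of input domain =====

-- B: two independent filtering passes (one per case) instead of A's single loop with two accumulators; same cost.

-- ===== PORT A =====
-- single pass: fold over the characters maintaining (uppercase, lowercase) accumulator lists
def separate_upper_lower (s : String) : String × String :=
  let acc := s.toList.foldl
    (fun (p : List Char × List Char) i =>
      if PySem.Chars.isupper i then (p.1 ++ [i], p.2)
      else if PySem.Chars.islower i then (p.1, p.2 ++ [i])
      else p)
    ([], [])
  (String.mk acc.1, String.mk acc.2)

-- ===== PORT B =====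
-- two independent filters
def separate_upper_lower_alt (s : String) : String × String :=
  (String.mk (s.toList.filter (fun c => PySem.Chars.isupper c)),
   String.mk (s.toList.filter (fun c => PySem.Chars.islower c)))

-- ===== PRECONDITION & SPEC =====
def Spec_separate_upper_lower (s : String) (out : String × String) : Prop := out = separate_upper_lower_alt s
instance (s : String) (out : String × String) : Decidable (Spec_separate_upper_lower s out) := by unfold Spec_separate_upper_lower; infer_instance

-- ===== CLAIM (what is proved, stated in full; the proofs are below) =====
def Claim_equal_separate_upper_lower : Prop := ∀ (s : String), Dom_separate_upper_lower s → Spec_separate_upper_lower s (separate_upper_lower s)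

-- ===== LEMMAS AND PROOFS =====

-- an uppercase ASCII letter is not lowercase
theorem upper_not_lower (c : Char) (h : PySem.Chars.isupper c = true) :
    PySem.Chars.islower c = false := by
  simp [PySem.Chars.isupper, PySem.Chars.islower, Char.le_def,
        UInt32.le_iff_toNat_le] at *
  omega

-- loop invariant: the fold appends the filtered suffix to each accumulator
theorem sul_fold_inv (l : List Char) (u v : List Char) :
    l.foldl
      (fun (p : List Char × List Char) i =>
        if PySem.Chars.isupper i then (p.1 ++ [i], p.2)
        else if PySem.Chars.islower i then (p.1, p.2 ++ [i])
        else p)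
      (u, v)
    = (u ++ l.filter (fun c => PySem.Chars.isupper c),
       v ++ l.filter (fun c => PySem.Chars.islower c)) := by
  induction l generalizing u v with
  | nil => simp
  | cons c t ih =>
    by_cases hu : PySem.Chars.isupper c
    · simp [List.foldl, hu, ih, upper_not_lower c hu]
    · by_cases hl : PySem.Chars.islower c
      · simp [List.foldl, hu, hl, ih]
      · simp [List.foldl, hu, hl, ih]

-- ===== VERDICT (by name: the statement is the Claim_ definition above) =====
theorem separate_upper_lower_spec : Claim_equal_separate_upper_lower := by
  intro s _
  unfold Spec_separate_upper_lower separate_upper_lower separate_upper_lower_alt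
  simp [sul_fold_inv]
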